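-- pv_equiv track=rewrite | github.com/Logan-Kelsch/Fifteen_Tile_AI | FifteenAI.py | getMoveFringe
-- ===== SOURCE A (Python) =====
-- def getMoveFringe(board, last_moves):
--     e_r, e_c = getEmptySquare(board)
--     possibleMoves = [[0,0], [0,1], [0,2], [0,3],\
--                      [1,0], [1,1], [1,2], [1,3],\
--                      [2,0], [2,1], [2,2], [2,3],\
--                      [3,0], [3,1], [3,2], [3,3]]
--     fringe = []
--     for move in possibleMoves:
--        if(isValidMove(4, move[0], move[1], e_r, e_c)):
--           if(isRecentMove(move,last_moves) is False):
--             fringe.append(move)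
--
--     return fringe
--
-- def isRecentMove(move, last_moves):
--   for lmoves in last_moves:
--       if(lmoves[0]==move[0] and lmoves[1]==move[1]):
--           return True
--   return False
--
-- def getEmptySquare(board):
--     for r in range(len(board)):
--       for c in range(len(board[r])):
--         if(board[r][c] == 0):
--           return r, c
--     return -1, -1
--
-- def isValidMove(CELL_COUNT, r, c, e_r, e_c):
--     if (bool(r==e_r) != bool(c==e_c)):
--       if (0<=r < CELL_COUNT and 0 <= c < CELL_COUNT):
--         return 1
--     else:
--       return 0
-- ===== SOURCE B (Python) =====
-- def getMoveFringe(board, last_moves):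
--     # Find the empty square (first 0 in row-major order), (-1, -1) if none.
--     e_r, e_c = -1, -1
--     for r, row in enumerate(board):
--         for c, v in enumerate(row):
--             if v == 0:
--                 e_r, e_c = r, c
--                 break
--         if e_r != -1:
--             break
--     # Construct the valid moves directly from geometry, in row-major order:
--     # the empty square's row contributes every other column of that row, and
--     # each other row contributes the empty square's column (when it is on board).
--     recent = {tuple(m[:2]) for m in last_moves}
--     fringe = []
--     for r in range(4):
--         if r == e_r:
--             fringe += [[r, c] for c in range(4) if c != e_c]
--         elif 0 <= e_c < 4:
--             fringe.append([r, e_c])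
--     return [m for m in fringe if tuple(m) not in recent]
-- ===== Notes on version B (the rewrite author's own statement) =====
-- stated objective: alternative
-- what changed: Instead of scanning all 16 cells and testing each with isValidMove, B locates the empty square once and constructs the valid moves directly from geometry (the empty square's row minus its own column, plus its column in every other row), then filters by a set of recent moves built once.
import Mathlib
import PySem

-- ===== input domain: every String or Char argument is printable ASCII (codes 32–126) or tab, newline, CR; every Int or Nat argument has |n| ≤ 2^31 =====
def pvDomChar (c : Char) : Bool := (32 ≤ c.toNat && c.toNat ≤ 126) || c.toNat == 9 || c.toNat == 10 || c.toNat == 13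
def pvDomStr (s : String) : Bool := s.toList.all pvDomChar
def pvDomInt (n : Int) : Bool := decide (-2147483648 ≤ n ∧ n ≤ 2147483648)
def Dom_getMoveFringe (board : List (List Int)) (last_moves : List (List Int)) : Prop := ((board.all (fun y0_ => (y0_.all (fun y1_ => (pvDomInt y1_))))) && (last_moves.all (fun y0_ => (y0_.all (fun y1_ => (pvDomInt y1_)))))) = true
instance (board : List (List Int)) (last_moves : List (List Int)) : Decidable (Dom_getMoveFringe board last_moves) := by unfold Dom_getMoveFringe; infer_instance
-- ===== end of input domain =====

-- B constructs the valid moves directly from the empty square's geometry instead of testing all 16 cells (objective: alternative).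


-- ===== PORT A =====
-- getEmptySquare's inner loop: scan one row, column counter c
def pvA_emptyInRow (r : Int) (row : List Int) (c : Int) : Option (Int × Int) :=
  match row with
  | [] => none
  | x :: rest => if x = 0 then some (r, c) else pvA_emptyInRow r rest (c + 1)

-- getEmptySquare's outer loop over rows (row counter r); returns (-1, -1) when no 0 is found
def pvA_getEmptyAux (rows : List (List Int)) (r : Int) : Int × Int :=
  match rows with
  | [] => (-1, -1)
  | row :: rest =>
    match pvA_emptyInRow r row 0 with
    | some p => p
    | none => pvA_getEmptyAux rest (r + 1)

def pvA_getEmptySquare (board : List (List Int)) : Int × Int := pvA_getEmptyAux board 0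

-- isValidMove returns 1 / 0 / None in Python; only its truth value is used, which this Bool is exactly
def pvA_isValidMove (cellCount r c e_r e_c : Int) : Bool :=
  if (decide (r = e_r)) != (decide (c = e_c)) then
    decide (0 ≤ r ∧ r < cellCount) && decide (0 ≤ c ∧ c < cellCount)
  else false

-- isRecentMove with Python's short-circuit 'and'; lm[0], lm[1] via pyGetD (exact under Pre_: recent entries have length ≥ 2)
def pvA_isRecentMove (move : List Int) (last_moves : List (List Int)) : Bool :=
  match last_moves with
  | [] => false
  | lm :: rest =>
    if PySem.List.pyGetD lm 0 0 = PySem.List.pyGetD move 0 0 then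
      if PySem.List.pyGetD lm 1 0 = PySem.List.pyGetD move 1 0 then true
      else pvA_isRecentMove move rest
    else pvA_isRecentMove move rest

def pvA_possibleMoves : List (List Int) :=
  [[0,0], [0,1], [0,2], [0,3],
   [1,0], [1,1], [1,2], [1,3],
   [2,0], [2,1], [2,2], [2,3],
   [3,0], [3,1], [3,2], [3,3]]

def getMoveFringe (board : List (List Int)) (last_moves : List (List Int)) : List (List Int) :=
  let e := pvA_getEmptySquare board
  pvA_possibleMoves.foldl
    (fun fringe move =>
      if pvA_isValidMove 4 (PySem.List.pyGetD move 0 0) (PySem.List.pyGetD move 1 0) e.1 e.2 then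
        if pvA_isRecentMove move last_moves = false then fringe ++ [move] else fringe
      else fringe)
    []

-- ===== PORT B =====
-- first index holding 0 in a row (B's inner enumerate loop with break)
def pvB_firstZero (row : List Int) (c : Nat) : Option Nat :=
  match row with
  | [] => none
  | x :: rest => if x = 0 then some c else pvB_firstZero rest (c + 1)

-- B's outer enumerate loop with break: first 0 in row-major order, (-1, -1) if none
def pvB_emptyAux (rows : List (List Int)) (r : Int) : Int × Int :=
  match rows with
  | [] => (-1, -1)
  | row :: rest =>
    match pvB_firstZero row 0 with
    | some c => (r, (c : Int))
    | none => pvB_emptyAux rest (r + 1)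

-- tuple(m[:2]) as the key; tuples compare componentwise, so List Int equality is exact
def pvB_key (m : List Int) : List Int := PySem.List.slice m none (some 2)

def getMoveFringe_alt (board : List (List Int)) (last_moves : List (List Int)) : List (List Int) :=
  let e := pvB_emptyAux board 0
  let recent : PySem.Set (List Int) := PySem.Set.ofList (last_moves.map pvB_key)
  let fringe := (PySem.List.pyRange 0 4 1).foldl
    (fun acc r =>
      if r = e.1 then
        acc ++ ((PySem.List.pyRange 0 4 1).filter (fun c => decide (c ≠ e.2))).map (fun c => [r, c])
      else if 0 ≤ e.2 ∧ e.2 < 4 then acc ++ [[r, e.2]]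
      else acc)
    []
  -- tuple(m): fringe members are two-element lists, so the list itself is the tuple key
  fringe.filter (fun m => !(PySem.Set.contains recent m))

-- ===== PRECONDITION & SPEC =====
-- Pre_ excludes inputs where some last_moves entry is shorter than 2 elements and starts with a plausible
-- row index (or is empty) while the board still has an empty square: there Python A raises IndexError when the
-- recent-move comparison reaches the short entry (the condition slightly over-approximates: on rare boards such
-- an entry is never reached and A still returns, as stated in the claim).
def Pre_getMoveFringe (board : List (List Int)) (last_moves : List (List Int)) : Prop :=
  (∀ row ∈ board, (0 : Int) ∉ row) ∨
    ∀ lm ∈ last_moves, 2 ≤ lm.length ∨ (lm ≠ [] ∧ (lm.headI < 0 ∨ 4 ≤ lm.headI))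
instance (board : List (List Int)) (last_moves : List (List Int)) : Decidable (Pre_getMoveFringe board last_moves) := by unfold Pre_getMoveFringe; infer_instance

def pvWitness_getMoveFringe : List (List Int) × List (List Int) :=
  ([[1, 2, 3, 4], [5, 6, 0, 7], [8, 9, 10, 11], [12, 13, 14, 15]], [[1, 1], [2, 2]])

def Spec_getMoveFringe (board : List (List Int)) (last_moves : List (List Int)) (out : List (List Int)) : Prop := out = getMoveFringe_alt board last_moves
instance (board : List (List Int)) (last_moves : List (List Int)) (out : List (List Int)) : Decidable (Spec_getMoveFringe board last_moves out) := by unfold Spec_getMoveFringe; infer_instance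

-- ===== CLAIM (what is proved, stated in full; the proofs are below) =====
def Claim_equal_getMoveFringe : Prop := ∀ (board : List (List Int)) (last_moves : List (List Int)), Dom_getMoveFringe board last_moves → Pre_getMoveFringe board last_moves → Spec_getMoveFringe board last_moves (getMoveFringe board last_moves)

-- ===== LEMMAS AND PROOFS =====

-- the two empty-square scans agree
theorem pvEmptyRow_eq (row : List Int) (r : Int) (c : Nat) :
    pvA_emptyInRow r row (c : Int) = (pvB_firstZero row c).map (fun n => (r, (n : Int))) := by
  induction row generalizing c with
  | nil => simp [pvA_emptyInRow, pvB_firstZero]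
  | cons x rest ih =>
    simp only [pvA_emptyInRow, pvB_firstZero]
    by_cases h : x = 0
    · simp [h]
    · simpa [h] using ih (c + 1)

theorem pvEmpty_eq (rows : List (List Int)) (r : Int) :
    pvA_getEmptyAux rows r = pvB_emptyAux rows r := by
  induction rows generalizing r with
  | nil => rfl
  | cons row rest ih =>
    simp only [pvA_getEmptyAux, pvB_emptyAux]
    rw [show (0 : Int) = ((0 : Nat) : Int) from rfl, pvEmptyRow_eq]
    cases pvB_firstZero row 0 <;> simp [ih]

-- the recent-move scan is membership of the key in B's set (for a pair move with row index 0..3,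
-- given that every reachable last_moves entry is either long enough or starts outside 0..3)
theorem pvRecent_eq (a b : Int) (ha : 0 ≤ a ∧ a < 4) (lms : List (List Int))
    (h : ∀ lm ∈ lms, 2 ≤ lm.length ∨ (lm ≠ [] ∧ (lm.headI < 0 ∨ 4 ≤ lm.headI))) :
    pvA_isRecentMove [a, b] lms
      = PySem.Set.contains (PySem.Set.ofList (lms.map pvB_key)) [a, b] := by
  induction lms with
  | nil => simp [pvA_isRecentMove]
  | cons lm rest ih =>
    have hrest := fun x hx => h x (List.mem_cons_of_mem lm hx)
    have ih' := ih hrest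
    rcases h lm (List.mem_cons_self) with hlen | ⟨hne, hout⟩
    · obtain ⟨x, y, t, rfl⟩ : ∃ x y t, lm = x :: y :: t := by
        match lm, hlen with
        | x :: y :: t, _ => exact ⟨x, y, t, rfl⟩
      have hkey : pvB_key (x :: y :: t) = [x, y] := rfl
      have h1 : PySem.List.pyGetD (x :: y :: t) 1 0 = y := by simp [pysem]
      have h1' : PySem.List.pyGetD [a, b] 1 0 = b := by simp [pysem]
      simp only [pvA_isRecentMove, PySem.List.pyGetD_zero_cons, h1, h1']
      by_cases hx : x = a
      · by_cases hy : y = b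
        · simp only [List.map_cons, hkey]
          simp [hx, hy, PySem.Set.mem_ofList]
        · have hne2 : ¬ ([a, b] = [x, y]) := fun hh => hy (by injection hh with _ h2; injection h2 with h2 _; exact h2.symm)
          simp only [List.map_cons, hkey]
          simp only [hx, hy, if_true, if_false, ih']
          simp only [hx] at hne2
          simp [PySem.Set.mem_ofList, hne2]
      · have hne2 : ¬ ([a, b] = [x, y]) := fun hh => hx (by injection hh with h1 _; exact h1.symm)
        simp only [List.map_cons, hkey]
        simp only [hx, if_false, ih']
        simp [PySem.Set.mem_ofList, hne2]
    · obtain ⟨x, t, rfl⟩ : ∃ x t, lm = x :: t := by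
        match lm, hne with
        | x :: t, _ => exact ⟨x, t, rfl⟩
      have hkey : pvB_key (x :: t) = x :: t.take 1 := by
        cases t <;> rfl
      have hx : ¬ (x = a) := by simp only [List.headI] at hout; omega
      simp only [pvA_isRecentMove, PySem.List.pyGetD_zero_cons, hx, if_false, ih']
      have hne2 : ¬ ([a, b] = x :: t.take 1) := fun hh => hx (by injection hh with h1 _; exact h1.symm)
      simp only [List.map_cons, hkey]
      simp [PySem.Set.mem_ofList, hne2]

-- normalization: only whether e equals 0,1,2,3 (or none of them) matters
def pvNorm (e : Int) : Int :=
  if e = 0 then 0 else if e = 1 then 1 else if e = 2 then 2 else if e = 3 then 3 else 4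

theorem pvNorm_mem (e : Int) : pvNorm e ∈ ([0, 1, 2, 3, 4] : List Int) := by
  unfold pvNorm; split_ifs <;> simp

theorem pvDec_norm (k e : Int) (h0 : 0 ≤ k) (h4 : k < 4) : decide (k = e) = decide (k = pvNorm e) := by
  unfold pvNorm; split_ifs with a b c d <;> simp only [decide_eq_decide] <;> omega

theorem pvRange_norm (e : Int) : decide (0 ≤ e ∧ e < 4) = decide (0 ≤ pvNorm e ∧ pvNorm e < 4) := by
  unfold pvNorm; split_ifs <;> simp only [decide_eq_decide] <;> omega

theorem pvNorm_of_range (e : Int) (h : 0 ≤ e ∧ e < 4) : pvNorm e = e := by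
  unfold pvNorm; split_ifs <;> omega

-- A's filtered valid-move list is invariant under pvNorm
def pvValidList (e_r e_c : Int) : List (List Int) :=
  pvA_possibleMoves.filter (fun m => pvA_isValidMove 4 (PySem.List.pyGetD m 0 0) (PySem.List.pyGetD m 1 0) e_r e_c)

theorem pvValid_norm (r c e_r e_c : Int) (hr : 0 ≤ r ∧ r < 4) (hc : 0 ≤ c ∧ c < 4) :
    pvA_isValidMove 4 r c e_r e_c = pvA_isValidMove 4 r c (pvNorm e_r) (pvNorm e_c) := by
  unfold pvA_isValidMove
  rw [pvDec_norm r e_r hr.1 hr.2, pvDec_norm c e_c hc.1 hc.2]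

theorem pvValidList_norm (e_r e_c : Int) : pvValidList e_r e_c = pvValidList (pvNorm e_r) (pvNorm e_c) := by
  unfold pvValidList
  apply List.filter_congr
  intro m hm
  fin_cases hm <;> exact pvValid_norm _ _ _ _ (by decide) (by decide)

-- B's geometric fringe and its invariance under pvNorm
def pvGeom (e_r e_c : Int) : List (List Int) :=
  (PySem.List.pyRange 0 4 1).foldl
    (fun acc r =>
      if r = e_r then
        acc ++ ((PySem.List.pyRange 0 4 1).filter (fun c => decide (c ≠ e_c))).map (fun c => [r, c])
      else if 0 ≤ e_c ∧ e_c < 4 then acc ++ [[r, e_c]]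
      else acc)
    []

theorem pvGeom_norm (e_r e_c : Int) : pvGeom e_r e_c = pvGeom (pvNorm e_r) (pvNorm e_c) := by
  unfold pvGeom
  apply PySem.List.foldl_congr_mem
  intro acc r hr
  have hrb : 0 ≤ r ∧ r < 4 := PySem.List.mem_pyRange_one.mp hr
  have her : (r = e_r) ↔ (r = pvNorm e_r) := by
    simpa only [decide_eq_decide] using pvDec_norm r e_r hrb.1 hrb.2
  have hrange : (0 ≤ e_c ∧ e_c < 4) ↔ (0 ≤ pvNorm e_c ∧ pvNorm e_c < 4) := by
    simpa only [decide_eq_decide] using pvRange_norm e_c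
  by_cases h : r = pvNorm e_r
  · rw [if_pos (her.mpr h), if_pos h]
    congr 2
    apply List.filter_congr
    intro c hc
    have hcb : 0 ≤ c ∧ c < 4 := PySem.List.mem_pyRange_one.mp hc
    have : (c = e_c) ↔ (c = pvNorm e_c) := by
      simpa only [decide_eq_decide] using pvDec_norm c e_c hcb.1 hcb.2
    simp only [ne_eq, decide_not, this]
  · rw [if_neg (fun hh => h (her.mp hh)), if_neg h]
    by_cases hin : 0 ≤ e_c ∧ e_c < 4
    · rw [if_pos hin, if_pos (hrange.mp hin), pvNorm_of_range e_c hin]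
    · rw [if_neg hin, if_neg (fun hh => hin (hrange.mpr hh))]

-- the 25 normalized cases, checked by computation
theorem pvValidList_eq_pvGeom (e_r e_c : Int) : pvValidList e_r e_c = pvGeom e_r e_c := by
  rw [pvValidList_norm, pvGeom_norm]
  have key : ∀ a ∈ ([0, 1, 2, 3, 4] : List Int), ∀ b ∈ ([0, 1, 2, 3, 4] : List Int),
      pvValidList a b = pvGeom a b := by decide
  exact key _ (pvNorm_mem e_r) _ (pvNorm_mem e_c)

-- A's fold is the filtered list
theorem pvA_fold_eq (e_r e_c : Int) (lms : List (List Int)) :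
    pvA_possibleMoves.foldl
      (fun fringe move =>
        if pvA_isValidMove 4 (PySem.List.pyGetD move 0 0) (PySem.List.pyGetD move 1 0) e_r e_c then
          if pvA_isRecentMove move lms = false then fringe ++ [move] else fringe
        else fringe)
      []
    = (pvValidList e_r e_c).filter (fun m => !pvA_isRecentMove m lms) := by
  have step : pvA_possibleMoves.foldl
      (fun fringe move =>
        if pvA_isValidMove 4 (PySem.List.pyGetD move 0 0) (PySem.List.pyGetD move 1 0) e_r e_c then
          if pvA_isRecentMove move lms = false then fringe ++ [move] else fringe
        else fringe)
      []
    = pvA_possibleMoves.foldl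
      (fun fringe move =>
        if pvA_isValidMove 4 (PySem.List.pyGetD move 0 0) (PySem.List.pyGetD move 1 0) e_r e_c
            && !pvA_isRecentMove move lms then fringe ++ [move] else fringe)
      [] := by
    apply PySem.List.foldl_congr_mem
    intro acc m _
    cases hv : pvA_isValidMove 4 (PySem.List.pyGetD m 0 0) (PySem.List.pyGetD m 1 0) e_r e_c <;>
      cases hr : pvA_isRecentMove m lms <;> simp
  rw [step, PySem.List.foldl_append_if_eq_filter, List.nil_append]
  unfold pvValidList
  rw [List.filter_filter]
  apply List.filter_congr
  intro m _
  cases hv : pvA_isValidMove 4 (PySem.List.pyGetD m 0 0) (PySem.List.pyGetD m 1 0) e_r e_c <;>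
    cases hr : pvA_isRecentMove m lms <;> simp

-- a row without 0 yields no hit; a board without 0 yields (-1, -1)
theorem pvFirstZero_none (row : List Int) (h : (0 : Int) ∉ row) (c : Nat) :
    pvB_firstZero row c = none := by
  induction row generalizing c with
  | nil => rfl
  | cons x rest ih =>
    simp only [List.mem_cons, not_or] at h
    simp only [pvB_firstZero, if_neg (fun hh : x = 0 => h.1 hh.symm)]
    exact ih h.2 (c + 1)

theorem pvEmpty_none (board : List (List Int)) (h : ∀ row ∈ board, (0 : Int) ∉ row) (r : Int) :
    pvB_emptyAux board r = (-1, -1) := by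
  induction board generalizing r with
  | nil => rfl
  | cons row rest ih =>
    simp only [pvB_emptyAux, pvFirstZero_none row (h row (List.mem_cons_self)) 0]
    exact ih (fun x hx => h x (List.mem_cons_of_mem row hx)) (r + 1)

-- every filtered move is one of the 16 literal pairs
theorem pvMove_shape (m : List Int) (hm : m ∈ pvA_possibleMoves) :
    ∃ a b, m = [a, b] ∧ (0 ≤ a ∧ a < 4) := by
  fin_cases hm <;> exact ⟨_, _, rfl, by norm_num⟩

-- the port of B, written with its helpers (definitional)
theorem pvAlt_eq (board lms : List (List Int)) :
    getMoveFringe_alt board lms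
      = (pvGeom (pvB_emptyAux board 0).1 (pvB_emptyAux board 0).2).filter
          (fun m => !(PySem.Set.contains (PySem.Set.ofList (lms.map pvB_key)) m)) := rfl

-- ===== VERDICT (by name: the statement is the Claim_ definition above) =====
theorem getMoveFringe_spec : Claim_equal_getMoveFringe := by
  unfold Claim_equal_getMoveFringe
  intro board last_moves _ hpre
  unfold Spec_getMoveFringe getMoveFringe
  rw [pvAlt_eq]
  rw [show pvA_getEmptySquare board = pvB_emptyAux board 0 from pvEmpty_eq board 0]
  rw [pvA_fold_eq]
  rcases hpre with hz | hlen
  · rw [pvEmpty_none board hz 0]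
    rw [show pvValidList (-1, -1).1 (-1, -1).2 = [] from by decide]
    rw [show pvGeom (-1, -1).1 (-1, -1).2 = [] from by decide]
    rfl
  · have step : (pvValidList (pvB_emptyAux board 0).1 (pvB_emptyAux board 0).2).filter
        (fun m => !pvA_isRecentMove m last_moves)
      = (pvValidList (pvB_emptyAux board 0).1 (pvB_emptyAux board 0).2).filter
        (fun m => !(PySem.Set.contains (PySem.Set.ofList (last_moves.map pvB_key)) m)) := by
      apply List.filter_congr
      intro m hm
      have hm' : m ∈ pvA_possibleMoves := (List.mem_filter.mp hm).1
      obtain ⟨a, b, rfl, ha⟩ := pvMove_shape m hm'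
      rw [pvRecent_eq a b ha last_moves hlen]
    rw [step, pvValidList_eq_pvGeom]
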